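-- pv_equiv track=rewrite | github.com/sclertta/Sclertta.Databases | bump.py | bump_number
-- ===== SOURCE A (Python) =====
-- def bump_number(current, next):
--     sp = current.split('.')
--     major = int(sp[0])
--     minor = int(sp[1]) if len(sp) > 1 else 0
--     patch = int(sp[2]) if len(sp) > 2 else 0
--     rev = int(sp[3]) if len(sp) > 3 else 0
--
--     result = []
--     size = len(sp)
--     if next == 'major':
--         result = [major+1, 0, 0, 0]
--     elif next == 'minor':
--         result = [major, minor+1, 0, 0]
--         size = max(size, 2)
--     elif next == 'patch':
--         result = [major, minor, patch+1, 0]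
--         size = max(size, 3)
--     elif next == 'revision':
--         result = [major, minor, patch, rev+1]
--         size = max(size, 4)
--     else:
--         return next
--     return '.'.join([str(x) for x in result[:size]])
-- ===== SOURCE B (Python) =====
-- def bump_number(current, next):
--     names = ['major', 'minor', 'patch', 'revision']
--     fields = current.split('.')
--     vals = [int(x) for x in fields[:4]]
--     if next not in names:
--         return next
--     out = []
--     rest = vals
--     extra = len(fields) - len(vals)
--     for name in names:
--         val = rest[0] if rest else 0
--         rest = rest[1:]
--         if name == next:
--             out.append(val + 1)
--             break
--         out.append(val)
--     out += [0] * min(len(rest) + extra, 4 - len(out))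
--     return '.'.join(str(x) for x in out)
-- ===== Notes on version B (the rewrite author's own statement) =====
-- stated objective: alternative
-- what changed: A builds a full 4-element result table per branch and truncates it by a computed size; B instead does one left-to-right co-traversal of the component names and the parsed values with an early break (copy until the named component, bump it, stop), then pads one zero per leftover original field, with no result table and no branch/size dispatch.
import Mathlib
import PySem

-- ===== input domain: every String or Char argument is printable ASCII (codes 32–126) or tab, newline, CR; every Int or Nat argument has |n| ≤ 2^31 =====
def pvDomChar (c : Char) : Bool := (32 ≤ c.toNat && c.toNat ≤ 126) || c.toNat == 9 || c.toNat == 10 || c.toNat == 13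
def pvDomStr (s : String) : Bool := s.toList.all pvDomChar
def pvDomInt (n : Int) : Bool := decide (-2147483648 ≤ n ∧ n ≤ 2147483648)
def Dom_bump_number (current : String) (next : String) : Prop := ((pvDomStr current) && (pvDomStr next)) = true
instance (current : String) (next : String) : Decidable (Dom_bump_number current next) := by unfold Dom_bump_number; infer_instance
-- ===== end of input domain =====

-- B replaces A's result-table-and-size computation by a single co-traversal of the component names and the split fields (objective: alternative decomposition).


-- ===== PORT A =====
-- literal port of A; int(sp[i]) raising ValueError corresponds to ofStr? = none, excluded by Pre_
def bump_number (current : String) (next : String) : String :=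
  let sp := (PySem.Str.split? current ".").getD []
  let major := (PySem.Int.ofStr? ((PySem.List.pyGet? sp 0).getD "")).getD 0
  let minor := if sp.length > 1 then (PySem.Int.ofStr? ((PySem.List.pyGet? sp 1).getD "")).getD 0 else 0
  let patch := if sp.length > 2 then (PySem.Int.ofStr? ((PySem.List.pyGet? sp 2).getD "")).getD 0 else 0
  let rev := if sp.length > 3 then (PySem.Int.ofStr? ((PySem.List.pyGet? sp 3).getD "")).getD 0 else 0
  let size := sp.length
  if next = "major" then
    PySem.Str.join "." (([major+1,0,0,0].take size).map PySem.Int.toStr)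
  else if next = "minor" then
    PySem.Str.join "." (([major,minor+1,0,0].take (max size 2)).map PySem.Int.toStr)
  else if next = "patch" then
    PySem.Str.join "." (([major,minor,patch+1,0].take (max size 3)).map PySem.Int.toStr)
  else if next = "revision" then
    PySem.Str.join "." (([major,minor,patch,rev+1].take (max size 4)).map PySem.Int.toStr)
  else next

-- ===== PORT B =====
-- the for-loop with break: walk the component names and the parsed values together;
-- returns the emitted numbers and the values left over when the loop stopped
def pvWalk (next : String) : List String → List Int → (List Int × List Int)
  | [], rest => ([], rest)
  | name :: names, rest =>
      let val : Int := match rest with | [] => 0 | x :: _ => x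
      let rest' := rest.tail
      if name = next then ([val + 1], rest')
      else
        let (out, r) := pvWalk next names rest'
        (val :: out, r)

def bump_number_alt (current : String) (next : String) : String :=
  let names := ["major", "minor", "patch", "revision"]
  let fields := (PySem.Str.split? current ".").getD []
  let vals := (fields.take 4).map (fun x => (PySem.Int.ofStr? x).getD 0)
  if next ∉ names then next
  else
    let extra := fields.length - vals.length
    let (out, rest) := pvWalk next names vals
    let padded := out ++ List.replicate (min (rest.length + extra) (4 - out.length)) 0
    PySem.Str.join "." (padded.map (fun x => PySem.Int.toStr x))

-- ===== PRECONDITION & SPEC =====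
-- Pre_ excludes exactly the inputs where Python A raises ValueError: a non-int string among the first four '.'-fields of current.
def Pre_bump_number (current : String) (_next : String) : Prop :=
  (((PySem.Str.split? current ".").getD []).take 4).all
    (fun x => (PySem.Int.ofStr? x).isSome) = true
instance (current : String) (next : String) : Decidable (Pre_bump_number current next) := by
  unfold Pre_bump_number; infer_instance
def pvWitness_bump_number : String × String := ("1.2.3", "minor")
def Spec_bump_number (current : String) (next : String) (out : String) : Prop := out = bump_number_alt current next
instance (current : String) (next : String) (out : String) : Decidable (Spec_bump_number current next out) := by unfold Spec_bump_number; infer_instance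

-- ===== CLAIM (what is proved, stated in full; the proofs are below) =====
def Claim_equal_bump_number : Prop := ∀ (current : String) (next : String), Dom_bump_number current next → Pre_bump_number current next → Spec_bump_number current next (bump_number current next)

-- ===== LEMMAS AND PROOFS =====

-- str.split always yields at least one piece
theorem pv_go_ne_nil (sep : List Char) : ∀ (fuel : Nat) (l cur : List Char) (acc : List (List Char)),
    PySem.Chars.splitOn.go sep fuel l cur acc ≠ [] := by
  intro fuel
  induction fuel with
  | zero => intro l cur acc; simp [PySem.Chars.splitOn.go]
  | succ n ih =>
    intro l cur acc
    cases l with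
    | nil => simp [PySem.Chars.splitOn.go]
    | cons c rest =>
      rw [PySem.Chars.splitOn.go]
      split
      · exact ih _ _ _
      · exact ih _ _ _

theorem pv_split_ne_nil (s : String) : ((PySem.Str.split? s ".").getD []) ≠ [] := by
  simp [PySem.Str.split?, PySem.Chars.split?, PySem.Chars.splitOn]
  exact pv_go_ne_nil _ _ _ _ _

-- the two bodies agree for any nonempty split list
theorem pv_core (next : String) (sp : List String) (h : sp ≠ []) :
    (let major := (PySem.Int.ofStr? ((PySem.List.pyGet? sp 0).getD "")).getD 0
     let minor := if sp.length > 1 then (PySem.Int.ofStr? ((PySem.List.pyGet? sp 1).getD "")).getD 0 else 0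
     let patch := if sp.length > 2 then (PySem.Int.ofStr? ((PySem.List.pyGet? sp 2).getD "")).getD 0 else 0
     let rev := if sp.length > 3 then (PySem.Int.ofStr? ((PySem.List.pyGet? sp 3).getD "")).getD 0 else 0
     let size := sp.length
     if next = "major" then
       PySem.Str.join "." (([major+1,0,0,0].take size).map PySem.Int.toStr)
     else if next = "minor" then
       PySem.Str.join "." (([major,minor+1,0,0].take (max size 2)).map PySem.Int.toStr)
     else if next = "patch" then
       PySem.Str.join "." (([major,minor,patch+1,0].take (max size 3)).map PySem.Int.toStr)
     else if next = "revision" then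
       PySem.Str.join "." (([major,minor,patch,rev+1].take (max size 4)).map PySem.Int.toStr)
     else next)
    =
    (let names := ["major", "minor", "patch", "revision"]
     let vals := (sp.take 4).map (fun x => (PySem.Int.ofStr? x).getD 0)
     if next ∉ names then next
     else
       let extra := sp.length - vals.length
       let (out, rest) := pvWalk next names vals
       let padded := out ++ List.replicate (min (rest.length + extra) (4 - out.length)) 0
       PySem.Str.join "." (padded.map (fun x => PySem.Int.toStr x))) := by
  by_cases h1 : next = "major"
  case pos =>
    subst h1
    rcases sp with _ | ⟨a, _ | ⟨b, _ | ⟨c, _ | ⟨d, rest⟩⟩⟩⟩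
    · exact absurd rfl h
    all_goals simp [pvWalk, List.take_of_length_le,
        show ∀ n : Nat, 4 ≤ n + 4 from fun n => by omega]
  by_cases h2 : next = "minor"
  case pos =>
    subst h2
    rcases sp with _ | ⟨a, _ | ⟨b, _ | ⟨c, _ | ⟨d, rest⟩⟩⟩⟩
    · exact absurd rfl h
    all_goals simp [pvWalk, PySem.List.pyGet?_ofNat', List.take_of_length_le,
        show ∀ n : Nat, 4 ≤ n + 4 from fun n => by omega]
  by_cases h3 : next = "patch"
  case pos =>
    subst h3
    rcases sp with _ | ⟨a, _ | ⟨b, _ | ⟨c, _ | ⟨d, rest⟩⟩⟩⟩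
    · exact absurd rfl h
    all_goals simp [pvWalk, PySem.List.pyGet?_ofNat', List.take_of_length_le,
        show ∀ n : Nat, 4 ≤ n + 4 from fun n => by omega]
  by_cases h4 : next = "revision"
  case pos =>
    subst h4
    rcases sp with _ | ⟨a, _ | ⟨b, _ | ⟨c, _ | ⟨d, rest⟩⟩⟩⟩
    · exact absurd rfl h
    all_goals simp [pvWalk, PySem.List.pyGet?_ofNat', List.take_of_length_le,
        show ∀ n : Nat, 4 ≤ n + 4 from fun n => by omega]
  case neg =>
    simp [h1, h2, h3, h4]

-- ===== VERDICT (by name: the statement is the Claim_ definition above) =====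
theorem bump_number_spec : Claim_equal_bump_number := by
  intro current next _ _
  unfold Spec_bump_number bump_number bump_number_alt
  exact pv_core next ((PySem.Str.split? current ".").getD []) (pv_split_ne_nil current)
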